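-- pv_equiv track=rewrite | github.com/link222333/pansnpeff | pansnpeff.py | _count_branch_numbers
-- ===== SOURCE A (Python) =====
-- from collections import defaultdict
--
-- def _count_branch_numbers(region_segs, links):
--     """
--     统计每个基因区域的分支数（与区域重叠的片段所涉及的连接数）
--
--     参数：
--         region_segs (dict): 区域-片段映射（见_map_regions_to_segments）
--         links (list): 片段连接关系[(from_seg, to_seg), ...]
--
--     返回：
--         dict: 分支数统计结果，结构同count_branches返回值
--     """
--     branch_counts = defaultdict(lambda: defaultdict(lambda: defaultdict(int)))
--
--     # 遍历每个参考序列的基因区域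
--     for ref_name, genes in region_segs.items():
--         for gene_id, features in genes.items():
--             for feature_type, segs in features.items():
--                 count = 0
--                 # 统计与该区域片段相关的连接数
--                 for (from_seg, to_seg) in links:
--                     # 若连接的起始或目标片段属于该区域，则计数+1
--                     if from_seg in segs or to_seg in segs:
--                         count += 1
--                 # 记录统计结果
--                 branch_counts[ref_name][gene_id][feature_type] = count
--
--     return branch_counts
-- ===== SOURCE B (Python) =====
-- def _count_branch_numbers(region_segs, links):
--     # Inverted index: segment -> set of link ids; per region entry, union id-sets.
--     seg2links = {}
--     for i, (from_seg, to_seg) in enumerate(links):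
--         seg2links.setdefault(from_seg, set()).add(i)
--         seg2links.setdefault(to_seg, set()).add(i)
--     empty = set()
--     result = {}
--     for ref_name, genes in region_segs.items():
--         gene_out = {}
--         for gene_id, features in genes.items():
--             feat_out = {}
--             for feature_type, segs in features.items():
--                 ids = set()
--                 for s in segs:
--                     ids |= seg2links.get(s, empty)
--                 feat_out[feature_type] = len(ids)
--             if feat_out:
--                 gene_out[gene_id] = feat_out
--         if gene_out:
--             result[ref_name] = gene_out
--     return result
-- ===== Notes on version B (the rewrite author's own statement) =====
-- stated objective: faster
-- what changed: Instead of scanning the whole link list once per (region, feature) entry, B builds an inverted index from segment to the set of link ids touching it in one pass, then computes each entry's count as the size of the union of the id-sets of its segments.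
import Mathlib
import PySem

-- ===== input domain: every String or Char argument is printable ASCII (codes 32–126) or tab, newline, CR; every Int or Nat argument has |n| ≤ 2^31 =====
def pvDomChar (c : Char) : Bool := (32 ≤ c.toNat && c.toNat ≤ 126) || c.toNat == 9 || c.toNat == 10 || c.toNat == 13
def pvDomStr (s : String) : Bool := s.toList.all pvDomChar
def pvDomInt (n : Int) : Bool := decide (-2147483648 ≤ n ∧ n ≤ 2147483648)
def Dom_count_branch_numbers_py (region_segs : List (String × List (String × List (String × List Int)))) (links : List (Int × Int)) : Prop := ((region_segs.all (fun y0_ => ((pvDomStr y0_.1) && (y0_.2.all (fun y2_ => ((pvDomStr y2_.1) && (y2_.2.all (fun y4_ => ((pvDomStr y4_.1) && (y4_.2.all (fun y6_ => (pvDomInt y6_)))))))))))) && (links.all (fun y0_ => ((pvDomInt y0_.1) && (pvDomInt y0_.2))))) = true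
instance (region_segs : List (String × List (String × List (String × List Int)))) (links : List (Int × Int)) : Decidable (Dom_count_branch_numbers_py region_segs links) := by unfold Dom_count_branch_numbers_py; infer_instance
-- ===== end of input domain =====

-- ===== PORT A =====
-- B is faster: it replaces A's per-(region,feature) scan of all links by a one-pass
-- inverted index segment -> set of link ids, counting each entry as a union size.
-- Python dict inputs/outputs have unique keys, so A's defaultdict writes in iteration
-- order are ported as nested maps; entries never written (empty inner dicts) are filtered out.

-- inner loop of A: for (from_seg, to_seg) in links: if from_seg in segs or to_seg in segs: count += 1
def aCount (segs : List Int) (links : List (Int × Int)) : Int :=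
  links.foldl (fun count l => if segs.contains l.1 || segs.contains l.2 then count + 1 else count) 0

def count_branch_numbers_py (region_segs : List (String × List (String × List (String × List Int)))) (links : List (Int × Int)) : List (String × List (String × List (String × Int))) :=
  (region_segs.map (fun r =>
    (r.1, (r.2.map (fun g =>
      (g.1, g.2.map (fun f => (f.1, aCount f.2 links))))).filter (fun g => !g.2.isEmpty)))).filter
    (fun r => !r.2.isEmpty)

-- ===== PORT B =====
-- seg2links.setdefault(seg, set()).add(i)  ==  modify seg (default empty set) (add i)
def segIndex (links : List (Int × Int)) : PySem.Dict Int (PySem.Set Int) :=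
  (PySem.List.enumerate links).foldl
    (fun d p =>
      (d.modify p.2.1 PySem.Set.empty (fun s => PySem.Set.add s p.1)).modify p.2.2
        PySem.Set.empty (fun s => PySem.Set.add s p.1))
    PySem.Dict.empty

-- ids = set(); for s in segs: ids |= seg2links.get(s, empty); return len(ids)
def bCount (segs : List Int) (d : PySem.Dict Int (PySem.Set Int)) : Int :=
  PySem.Set.len
    (segs.foldl (fun ids s => PySem.Set.union ids (d.getD s PySem.Set.empty)) PySem.Set.empty)

def count_branch_numbers_py_alt (region_segs : List (String × List (String × List (String × List Int)))) (links : List (Int × Int)) : List (String × List (String × List (String × Int))) :=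
  let d := segIndex links
  (region_segs.map (fun r =>
    (r.1, (r.2.map (fun g =>
      (g.1, g.2.map (fun f => (f.1, bCount f.2 d))))).filter (fun g => !g.2.isEmpty)))).filter
    (fun r => !r.2.isEmpty)

-- ===== PRECONDITION & SPEC =====
def Spec_count_branch_numbers_py (region_segs : List (String × List (String × List (String × List Int)))) (links : List (Int × Int)) (out : List (String × List (String × List (String × Int)))) : Prop := out = count_branch_numbers_py_alt region_segs links
instance (region_segs : List (String × List (String × List (String × List Int)))) (links : List (Int × Int)) (out : List (String × List (String × List (String × Int)))) : Decidable (Spec_count_branch_numbers_py region_segs links out) := by unfold Spec_count_branch_numbers_py; infer_instance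

-- ===== CLAIM (what is proved, stated in full; the proofs are below) =====
def Claim_equal_count_branch_numbers_py : Prop := ∀ (region_segs : List (String × List (String × List (String × List Int)))) (links : List (Int × Int)), Dom_count_branch_numbers_py region_segs links → Spec_count_branch_numbers_py region_segs links (count_branch_numbers_py region_segs links)

-- ===== LEMMAS AND PROOFS =====

-- the per-link step of segIndex
def idxStep (d : PySem.Dict Int (PySem.Set Int)) (p : Int × (Int × Int)) : PySem.Dict Int (PySem.Set Int) :=
  (d.modify p.2.1 PySem.Set.empty (fun s => PySem.Set.add s p.1)).modify p.2.2
    PySem.Set.empty (fun s => PySem.Set.add s p.1)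

lemma segIndex_eq_foldl (links : List (Int × Int)) :
    segIndex links = (PySem.List.enumerate links).foldl idxStep PySem.Dict.empty := rfl

lemma idx_mem (links : List (Int × Int)) (st : Int) (d : PySem.Dict Int (PySem.Set Int))
    (s i : Int) :
    i ∈ ((PySem.List.enumerate links st).foldl idxStep d).getD s PySem.Set.empty ↔
      i ∈ d.getD s PySem.Set.empty ∨
        ∃ (k : Nat) (_ : k < links.length),
          i = st + k ∧ ((links[k]).1 = s ∨ (links[k]).2 = s) := by
  induction links generalizing st d with
  | nil => simp [PySem.List.enumerate]
  | cons hd tl ih =>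
    rw [PySem.List.enumerate_cons, List.foldl_cons, ih]
    have hstep : i ∈ (idxStep d (st, hd)).getD s PySem.Set.empty ↔
        i ∈ d.getD s PySem.Set.empty ∨ (i = st ∧ (hd.1 = s ∨ hd.2 = s)) := by
      simp only [idxStep, PySem.Dict.getD_modify]
      split_ifs with h1 h2 h2 <;> simp [PySem.Set.mem_add, h1, h2] <;> tauto
    rw [hstep]
    constructor
    · rintro ((h | ⟨hi, hhd⟩) | ⟨k, hk, hi, hl⟩)
      · exact Or.inl h
      · exact Or.inr ⟨0, by simp, by simpa using hi, by simpa using hhd⟩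
      · refine Or.inr ⟨k + 1, by simpa using hk, by push_cast; omega, by simpa using hl⟩
    · rintro (h | ⟨k, hk, hi, hl⟩)
      · exact Or.inl (Or.inl h)
      · cases k with
        | zero => exact Or.inl (Or.inr ⟨by simpa using hi, by simpa using hl⟩)
        | succ k =>
          exact Or.inr ⟨k, by simpa using hk, by push_cast at hi ⊢; omega, by simpa using hl⟩

lemma union_fold_mem (segs : List Int) (d : PySem.Dict Int (PySem.Set Int))
    (acc : PySem.Set Int) (i : Int) :
    i ∈ segs.foldl (fun ids s => PySem.Set.union ids (d.getD s PySem.Set.empty)) acc ↔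
      i ∈ acc ∨ ∃ s ∈ segs, i ∈ d.getD s PySem.Set.empty := by
  induction segs generalizing acc with
  | nil => simp
  | cons hd tl ih =>
    rw [List.foldl_cons, ih]
    simp [PySem.Set.mem_union]
    tauto

lemma union_fold_nodup (segs : List Int) (d : PySem.Dict Int (PySem.Set Int))
    (acc : PySem.Set Int) (hacc : acc.Nodup) :
    (segs.foldl (fun ids s => PySem.Set.union ids (d.getD s PySem.Set.empty)) acc).Nodup := by
  induction segs generalizing acc with
  | nil => exact hacc
  | cons hd tl ih => exact ih _ (PySem.Set.nodup_union _ _ hacc)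

-- the key pointwise equality: both inner loops compute the number of links touching segs
lemma count_eq (segs : List Int) (links : List (Int × Int)) :
    aCount segs links = bCount segs (segIndex links) := by
  rw [aCount, PySem.List.foldl_count_if, zero_add]
  set ids := segs.foldl
      (fun ids s => PySem.Set.union ids ((segIndex links).getD s PySem.Set.empty))
      PySem.Set.empty with hids
  have hmem : ∀ i : Int, i ∈ ids ↔
      ∃ (k : Nat) (_ : k < links.length), i = (k : Int) ∧
        (segs.contains (links[k]).1 || segs.contains (links[k]).2) = true := by
    intro i
    rw [hids, union_fold_mem]
    simp only [segIndex_eq_foldl, idx_mem, PySem.Dict.getD_empty]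
    constructor
    · rintro (h | ⟨s, hs, (h | ⟨k, hk, hi, hl⟩)⟩)
      · simp [PySem.Set.empty] at h
      · simp [PySem.Set.empty] at h
      · refine ⟨k, hk, by simpa using hi, ?_⟩
        rcases hl with hl | hl <;> simp [hl ▸ hs]
    · rintro ⟨k, hk, hi, hl⟩
      simp only [Bool.or_eq_true, List.contains_iff_mem] at hl
      rcases hl with hl | hl
      · exact Or.inr ⟨_, hl, Or.inr ⟨k, hk, by simpa using hi, Or.inl rfl⟩⟩
      · exact Or.inr ⟨_, hl, Or.inr ⟨k, hk, by simpa using hi, Or.inr rfl⟩⟩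
  have hnd : ids.Nodup := by
    rw [hids]
    refine union_fold_nodup _ _ _ ?_
    simp [PySem.Set.empty]
  -- the reference list: first components of the touching links' enumeration
  set T := ((PySem.List.enumerate links).filter
      (fun p => segs.contains p.2.1 || segs.contains p.2.2)).map (·.1) with hT
  have hndT : T.Nodup := by
    have hp : ((PySem.List.enumerate links).filter
        (fun p => segs.contains p.2.1 || segs.contains p.2.2)).Pairwise
        (fun p q => p.1 < q.1) :=
      (PySem.List.pairwise_lt_enumerate links 0).sublist List.filter_sublist
    rw [hT, List.nodup_iff_pairwise_ne] at *
    exact (List.pairwise_map.mpr hp).imp (fun h => ne_of_lt h)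
  have hmemT : ∀ i : Int, i ∈ T ↔
      ∃ (k : Nat) (_ : k < links.length), i = (k : Int) ∧
        (segs.contains (links[k]).1 || segs.contains (links[k]).2) = true := by
    intro i
    rw [hT]
    simp only [List.mem_map, List.mem_filter, PySem.List.mem_enumerate_iff]
    constructor
    · rintro ⟨p, ⟨⟨k, hk, rfl⟩, hp⟩, rfl⟩
      exact ⟨k, hk, by simp, by simpa using hp⟩
    · rintro ⟨k, hk, rfl, hl⟩
      exact ⟨((k : Int), links[k]), ⟨⟨k, hk, by simp⟩, by simpa using hl⟩, rfl⟩
  have hperm : ids.Perm T := by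
    rw [List.perm_ext_iff_of_nodup hnd hndT]
    intro a; rw [hmem a, hmemT a]
  have hlen : ids.length = T.length := hperm.length_eq
  have hcount : T.length = links.countP
      (fun l => segs.contains l.1 || segs.contains l.2) := by
    rw [hT, List.length_map, ← List.countP_eq_length_filter]
    conv_rhs => rw [← PySem.List.map_snd_enumerate links 0, List.countP_map]
    rfl
  rw [bCount, ← hids]
  simp [PySem.Set.len, hlen, hcount]

-- ===== VERDICT (by name: the statement is the Claim_ definition above) =====
theorem count_branch_numbers_py_spec : Claim_equal_count_branch_numbers_py := by
  intro region_segs links _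
  unfold Spec_count_branch_numbers_py count_branch_numbers_py count_branch_numbers_py_alt
  congr 1
  apply List.map_congr_left
  intro r _
  congr 1
  congr 1
  apply List.map_congr_left
  intro g _
  congr 1
  apply List.map_congr_left
  intro f _
  rw [count_eq]
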